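-- pv_equiv track=rewrite | github.com/cdleonard/jsonurl-py | jsonurl_py.py | _unquote_aqf
-- ===== SOURCE A (Python) =====
-- class ParseError(Exception):
--     pass
--
-- def _unquote_aqf(arg: str) -> str:
--     ret = ""
--     spos = 0
--     while True:
--         epos = arg.find("!", spos)
--         if epos == -1:
--             return ret + arg[spos:]
--         if epos == len(arg) - 1:
--             raise ParseError(f"Invalid trailing ! in atom {arg!r}")
--         eval = arg[epos + 1]
--         if eval in "():,0123456789+-!fnt":
--             ret += arg[spos:epos] + eval
--             spos = epos + 2
--         else:
--             raise ParseError(f"Invalid !-escaped char {hex(ord(eval))}")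
-- ===== SOURCE B (Python) =====
-- class ParseError(Exception):
--     pass
--
-- def _unquote_aqf(arg: str) -> str:
--     out = []
--     i = 0
--     n = len(arg)
--     while i < n:
--         c = arg[i]
--         if c != "!":
--             out.append(c)
--             i += 1
--             continue
--         if i == n - 1:
--             raise ParseError(f"Invalid trailing ! in atom {arg!r}")
--         nxt = arg[i + 1]
--         if nxt not in "():,0123456789+-!fnt":
--             raise ParseError(f"Invalid !-escaped char {hex(ord(nxt))}")
--         out.append(nxt)
--         i += 2
--     return "".join(out)
-- ===== Notes on version B (the rewrite author's own statement) =====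
-- stated objective: alternative
-- what changed: Replaces the find-and-slice loop (repeated str.find with slice concatenation onto a growing string) by a single character-by-character index scan that appends to a list accumulator joined once at the end.
import Mathlib
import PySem

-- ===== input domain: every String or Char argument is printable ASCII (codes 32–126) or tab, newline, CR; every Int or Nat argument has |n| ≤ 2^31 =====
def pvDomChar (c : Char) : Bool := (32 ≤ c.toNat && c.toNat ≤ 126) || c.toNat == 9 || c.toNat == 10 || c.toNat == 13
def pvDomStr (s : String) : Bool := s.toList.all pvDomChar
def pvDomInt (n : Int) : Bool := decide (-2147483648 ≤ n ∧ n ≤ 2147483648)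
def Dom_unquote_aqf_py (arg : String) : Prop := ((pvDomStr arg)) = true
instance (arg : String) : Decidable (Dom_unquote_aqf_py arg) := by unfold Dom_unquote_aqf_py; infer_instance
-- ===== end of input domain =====

-- B replaces A's find-and-slice loop by a character-by-character scan with a list
-- accumulator (objective: alternative decomposition; return values proved equal).

-- ===== PORT A =====
-- the allowed escape characters, "():,0123456789+-!fnt"
def pvAllowed : List Char := "():,0123456789+-!fnt".toList

-- A's `while True` loop: state (ret, spos); fuel arg.length + 1 is never exhausted
-- because spos advances by at least 2 each iteration. On the two `raise ParseError`
-- branches the port returns [] (those inputs are excluded by Pre_).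
def pvALoop (arg : List Char) (ret : List Char) (spos : Nat) : Nat → List Char
  | 0 => []
  | fuel + 1 =>
    let epos := PySem.Chars.findFrom arg ['!'] (spos : Int)
    if epos = -1 then ret ++ PySem.List.slice arg (some (spos : Int)) none
    else if epos = (arg.length : Int) - 1 then []  -- raise ParseError (trailing !)
    else match PySem.List.pyGet? arg (epos + 1) with
      | none => []  -- unreachable: epos + 1 is in range
      | some ev =>
        if PySem.Chars.isIn [ev] pvAllowed then
          pvALoop arg (ret ++ PySem.List.slice arg (some (spos : Int)) (some epos) ++ [ev])
            (epos.toNat + 2) fuel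
        else []  -- raise ParseError (invalid !-escaped char)

def unquote_aqf_py (arg : String) : String :=
  String.ofList (pvALoop arg.toList [] 0 (arg.toList.length + 1))

-- ===== PORT B =====
-- B's index scan i = 0, 1, 2, … over the string, as structural recursion on the
-- character list; out.append/join is the accumulated result list. [] on the raises.
def pvBScan : List Char → List Char
  | [] => []
  | c :: rest =>
    if c = '!' then
      match rest with
      | [] => []  -- raise ParseError (trailing !)
      | d :: rest' =>
        if PySem.Chars.isIn [d] pvAllowed then d :: pvBScan rest'
        else []  -- raise ParseError (invalid !-escaped char)
    else c :: pvBScan rest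

def unquote_aqf_py_alt (arg : String) : String :=
  String.ofList (pvBScan arg.toList)

-- ===== PRECONDITION & SPEC =====
-- length of the maximal run of '!' characters immediately preceding position i
def pvBefRun (s : List Char) (i : Nat) : Nat :=
  ((s.take i).reverse.takeWhile (fun c => c = '!')).length

-- Pre_ excludes exactly the inputs on which A raises ParseError (B raises the same):
-- every '!' that opens an escape (i.e. is preceded by an even-length run of '!')
-- must be followed by a character of the allowed escape set.
def Pre_unquote_aqf_py (arg : String) : Prop :=
  ∀ i, i < arg.toList.length → arg.toList.getD i ' ' = '!' →
    Even (pvBefRun arg.toList i) →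
    i + 1 < arg.toList.length ∧ arg.toList.getD (i + 1) ' ' ∈ pvAllowed
instance (arg : String) : Decidable (Pre_unquote_aqf_py arg) := by
  unfold Pre_unquote_aqf_py; infer_instance

def pvWitness_unquote_aqf_py : String := "!:"

def Spec_unquote_aqf_py (arg : String) (out : String) : Prop := out = unquote_aqf_py_alt arg
instance (arg : String) (out : String) : Decidable (Spec_unquote_aqf_py arg out) := by
  unfold Spec_unquote_aqf_py; infer_instance

-- ===== CLAIM (what is proved, stated in full; the proofs are below) =====
def Claim_equal_unquote_aqf_py : Prop :=
  ∀ (arg : String), Dom_unquote_aqf_py arg → Pre_unquote_aqf_py arg →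
    Spec_unquote_aqf_py arg (unquote_aqf_py arg)

-- ===== LEMMAS AND PROOFS =====

-- recursive restatement of Pre_ used as the induction vehicle
def pvEscOK : List Char → Bool
  | [] => true
  | c :: rest =>
    if c = '!' then
      match rest with
      | [] => false
      | d :: rest' => PySem.Chars.isIn [d] pvAllowed && pvEscOK rest'
    else pvEscOK rest

theorem pv_befRun_cons_ne (c : Char) (r : List Char) (i : Nat) (hc : c ≠ '!') :
    pvBefRun (c :: r) (i + 1) = pvBefRun r i := by
  unfold pvBefRun
  rw [List.take_succ_cons, List.reverse_cons, List.takeWhile_append]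
  split_ifs with h
  · rw [show List.takeWhile (fun x => x = '!') [c] = [] from by simp [hc],
      List.append_nil, h]
  · rfl

theorem pv_befRun_even_two (d : Char) (r : List Char) (i : Nat) :
    Even (pvBefRun ('!' :: d :: r) (i + 2)) ↔ Even (pvBefRun r i) := by
  unfold pvBefRun
  rw [show i + 2 = i + 1 + 1 from rfl, List.take_succ_cons, List.take_succ_cons,
    List.reverse_cons, List.reverse_cons, List.takeWhile_append, List.takeWhile_append]
  rw [show List.takeWhile (fun x => x = '!') ['!'] = ['!'] from by simp]
  by_cases hL : (List.takeWhile (fun x => x = '!') (List.take i r).reverse).length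
      = (List.take i r).reverse.length
  · rw [if_pos hL]
    by_cases hd : d = '!'
    · rw [show List.takeWhile (fun x => x = '!') [d] = [d] from by simp [hd]]
      rw [if_pos (by simp)]
      simp [← hL, Nat.even_iff]
    · rw [show List.takeWhile (fun x => x = '!') [d] = [] from by simp [hd]]
      rw [if_neg (by simp)]
      simp [← hL]
  · rw [if_neg hL]
    rw [if_neg (by
      have h1 := (List.takeWhile_sublist (l := (List.take i r).reverse)
        (p := fun x => x = '!')).length_le
      simp at h1 ⊢
      omega)]

theorem pv_isIn_singleton (c : Char) (s : List Char) :
    PySem.Chars.isIn [c] s = true ↔ c ∈ s := by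
  rw [PySem.Chars.isIn_iff_infix]
  constructor
  · intro h; exact h.mem (List.mem_singleton_self c)
  · intro h
    obtain ⟨l, r, rfl⟩ := List.append_of_mem h
    exact ⟨l, r, by simp⟩

theorem pv_bScan_cons_ne (c : Char) (rest : List Char) (hc : c ≠ '!') :
    pvBScan (c :: rest) = c :: pvBScan rest := by
  rw [pvBScan.eq_def]; simp [hc]

theorem pv_escOK_cons_ne (c : Char) (rest : List Char) (hc : c ≠ '!') :
    pvEscOK (c :: rest) = pvEscOK rest := by
  rw [pvEscOK.eq_def]; simp [hc]

-- the closed-form Pre_ condition is exactly well-escapedness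
theorem pv_escOK_iff (s : List Char) :
    pvEscOK s = true ↔
    (∀ i, i < s.length → s.getD i ' ' = '!' → Even (pvBefRun s i) →
      i + 1 < s.length ∧ s.getD (i + 1) ' ' ∈ pvAllowed) := by
  induction s using pvEscOK.induct with
  | case1 => simp [pvEscOK]
  | case2 =>
    simp only [pvEscOK]
    constructor
    · intro h; exact absurd h (by simp)
    · intro h
      have h0 := h 0 (by simp) (by simp) (by simp [pvBefRun])
      simp at h0
  | case3 d rest' ih =>
    rw [show pvEscOK ('!' :: d :: rest')
        = (PySem.Chars.isIn [d] pvAllowed && pvEscOK rest') from by simp [pvEscOK],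
      Bool.and_eq_true, pv_isIn_singleton, ih]
    constructor
    · rintro ⟨hd, hP⟩ i hi hget heven
      match i with
      | 0 => exact ⟨by simp, by simpa using hd⟩
      | 1 =>
        simp only [List.getD_cons_succ, List.getD_cons_zero] at hget
        rw [hget] at heven
        simp [pvBefRun, Nat.even_iff] at heven
      | (i + 2) =>
        simp only [List.getD_cons_succ] at hget
        obtain ⟨h1, h2⟩ := hP i (by simp at hi; omega) hget
          ((pv_befRun_even_two d rest' i).mp heven)
        exact ⟨by simp; omega, by simpa [List.getD_cons_succ] using h2⟩
    · intro h
      refine ⟨?_, ?_⟩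
      · have h0 := h 0 (by simp) (by simp) (by simp [pvBefRun])
        simpa using h0.2
      · intro i hi hget heven
        obtain ⟨h1, h2⟩ := h (i + 2) (by simp; omega)
          (by simpa [List.getD_cons_succ] using hget)
          ((pv_befRun_even_two d rest' i).mpr heven)
        exact ⟨by simp at h1; omega, by simpa [List.getD_cons_succ] using h2⟩
  | case4 c rest hc ih =>
    rw [pv_escOK_cons_ne c rest hc, ih]
    constructor
    · intro h i hi hget heven
      match i with
      | 0 => exact absurd (by simpa using hget) hc
      | (i + 1) =>
        simp only [List.getD_cons_succ] at hget
        obtain ⟨h1, h2⟩ := h i (by simp at hi; omega) hget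
          (by rwa [pv_befRun_cons_ne c rest i hc] at heven)
        exact ⟨by simp; omega, by simpa [List.getD_cons_succ] using h2⟩
    · intro h i hi hget heven
      obtain ⟨h1, h2⟩ := h (i + 1) (by simp; omega)
        (by simpa [List.getD_cons_succ] using hget)
        (by rwa [pv_befRun_cons_ne c rest i hc])
      exact ⟨by simp at h1; omega, by simpa [List.getD_cons_succ] using h2⟩

theorem pv_bScan_bang (d : Char) (rest' : List Char)
    (hd : PySem.Chars.isIn [d] pvAllowed = true) :
    pvBScan ('!' :: d :: rest') = d :: pvBScan rest' := by
  simp [pvBScan, hd]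

theorem pv_bScan_no_bang (s : List Char) (h : '!' ∉ s) : pvBScan s = s := by
  induction s with
  | nil => rfl
  | cons c rest ih =>
    have hc : c ≠ '!' := fun hc => h (hc ▸ List.mem_cons_self)
    rw [pv_bScan_cons_ne c rest hc, ih (fun hm => h (List.mem_cons_of_mem _ hm))]

theorem pv_bScan_append (pre s : List Char) (h : '!' ∉ pre) :
    pvBScan (pre ++ s) = pre ++ pvBScan s := by
  induction pre with
  | nil => rfl
  | cons c rest ih =>
    have hc : c ≠ '!' := fun hc => h (hc ▸ List.mem_cons_self)
    rw [List.cons_append, pv_bScan_cons_ne c _ hc,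
      ih (fun hm => h (List.mem_cons_of_mem _ hm)), List.cons_append]

theorem pv_escOK_append (pre s : List Char) (h : '!' ∉ pre) :
    pvEscOK (pre ++ s) = pvEscOK s := by
  induction pre with
  | nil => rfl
  | cons c rest ih =>
    have hc : c ≠ '!' := fun hc => h (hc ▸ List.mem_cons_self)
    rw [List.cons_append, pv_escOK_cons_ne c _ hc,
      ih (fun hm => h (List.mem_cons_of_mem _ hm))]

-- main invariant: A's loop from state (ret, spos) produces ret ++ B's scan of the suffix
theorem pv_main (arg : List Char) : ∀ (fuel : Nat) (ret : List Char) (spos : Nat),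
    spos ≤ arg.length → arg.length - spos < fuel →
    pvEscOK (arg.drop spos) = true →
    pvALoop arg ret spos fuel = ret ++ pvBScan (arg.drop spos) := by
  intro fuel
  induction fuel with
  | zero => intro ret spos _ hf _; omega
  | succ fuel ih =>
    intro ret spos hle hf hok
    simp only [pvALoop]
    rw [PySem.Chars.findFrom_natCast arg ['!'] spos hle]
    by_cases h1 : PySem.Chars.find (List.drop spos arg) ['!'] = -1
    · rw [if_pos h1, if_pos rfl,
        PySem.List.slice_from arg (by omega : (0:Int) ≤ (spos:Int))]
      have hno : '!' ∉ List.drop spos arg := by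
        intro hm
        exact (PySem.Chars.find_eq_neg_one_iff _ ['!']).mp h1
          ((PySem.Chars.isIn_iff_infix ['!'] _).mp ((pv_isIn_singleton '!' _).mpr hm))
      rw [pv_bScan_no_bang _ hno]
      simp
    · -- find found a '!' at index jn
      set s' := List.drop spos arg with hs'
      simp only [if_neg h1]
      have hge : 0 ≤ PySem.Chars.find s' ['!'] := by
        have := PySem.Chars.neg_one_le_find s' ['!']
        omega
      obtain ⟨hpre, hmin⟩ := PySem.Chars.find_spec (s := s') (sub := ['!']) hge
      obtain ⟨jn, hjeq⟩ : ∃ n : ℕ, PySem.Chars.find s' ['!'] = (n : Int) :=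
        ⟨(PySem.Chars.find s' ['!']).toNat, by omega⟩
      rw [hjeq] at hpre hmin ⊢
      simp only [Int.toNat_natCast] at hpre hmin
      -- decomposition s' = take jn s' ++ '!' :: t
      obtain ⟨t, ht⟩ := hpre
      have hjlt : jn < s'.length := by
        have h2 := congrArg List.length ht
        simp at h2
        omega
      have hdec : s' = List.take jn s' ++ '!' :: t := by
        conv_lhs => rw [← List.take_append_drop jn s', ← ht]
        rfl
      have hprelen : (List.take jn s').length = jn := by simp; omega
      have hprenob : '!' ∉ List.take jn s' := by
        intro hm
        obtain ⟨l, r, hlr⟩ := List.append_of_mem hm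
        have hll : l.length < jn := by
          have h3 := congrArg List.length hlr
          simp at h3
          omega
        apply hmin l.length hll
        refine ⟨r ++ List.drop jn s', ?_⟩
        conv_rhs => rw [← List.take_append_drop jn s', hlr]
        rw [List.append_assoc, List.drop_left]
        rfl
      rw [hdec, pv_escOK_append _ _ hprenob] at hok
      cases t with
      | nil =>
        simp [pvEscOK] at hok
      | cons d rest' =>
        simp [pvEscOK] at hok
        obtain ⟨hdall, hok''⟩ := hok
        have hslen : s'.length = jn + 2 + rest'.length := by
          have h4 := congrArg List.length hdec
          simp [hprelen] at h4
          omega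
        have hslen2 : s'.length = arg.length - spos := by simp [hs']
        -- the two raise branches are not taken
        rw [if_neg (by omega : ¬((spos : Int) + (jn : Int) = -1))]
        rw [if_neg (by omega : ¬((spos : Int) + (jn : Int) = (arg.length : Int) - 1))]
        -- arg[epos + 1] = d
        have hget : PySem.List.pyGet? arg ((spos : Int) + (jn : Int) + 1) = some d := by
          rw [PySem.List.pyGet?_of_nonneg arg
            (by omega : (0:Int) ≤ (spos : Int) + (jn : Int) + 1)]
          have h6 : ((spos : Int) + (jn : Int) + 1).toNat = spos + (jn + 1) := by omega
          rw [h6, ← List.getElem?_drop, ← hs', hdec,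
            List.getElem?_append_right (by omega)]
          simp [hprelen]
        rw [hget]
        simp only [hdall, if_true]
        -- the recursive call
        have h7 : ((spos : Int) + (jn : Int)).toNat = spos + jn := by omega
        rw [h7]
        have hdrop : List.drop (spos + jn + 2) arg = rest' := by
          have h5 : List.drop (jn + 2) s' = rest' := by
            rw [hdec, List.drop_append, hprelen, List.drop_eq_nil_of_le (by omega),
              show jn + 2 - jn = 2 by omega]
            rfl
          rw [hs', List.drop_drop] at h5
          rw [show spos + jn + 2 = spos + (jn + 2) by omega]
          exact h5
        rw [ih _ (spos + jn + 2) (by omega) (by omega) (by rw [hdrop]; exact hok'')]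
        -- the slice is take jn s'
        have hslice : PySem.List.slice arg (some (spos : Int))
            (some ((spos : Int) + (jn : Int))) = List.take jn s' := by
          rw [show ((spos : Int) + (jn : Int)) = ((spos + jn : ℕ) : Int) by push_cast; ring,
            PySem.List.slice_natCast arg spos (spos + jn), ← hs']
          congr 1
          omega
        rw [hslice, hdrop, hdec, pv_bScan_append _ _ hprenob,
          pv_bScan_bang d rest' hdall]
        simp
        exact List.take_left' hprelen

-- ===== VERDICT (by name: the statement is the Claim_ definition above) =====
theorem unquote_aqf_py_spec : Claim_equal_unquote_aqf_py := by
  intro arg _ hpre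
  unfold Spec_unquote_aqf_py unquote_aqf_py unquote_aqf_py_alt
  unfold Pre_unquote_aqf_py at hpre
  rw [pv_main arg.toList (arg.toList.length + 1) [] 0 (by omega) (by omega)
    (by simpa using (pv_escOK_iff arg.toList).mpr hpre)]
  simp
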